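-- pv_equiv track=rewrite | github.com/katzuv/advent-of-code | puzzles/solutions/2023/d03/schematic_parser.py | _is_number_adjacent
-- ===== SOURCE A (Python) =====
-- from typing import Iterable
--
-- def _is_number_adjacent(
--     position: tuple[int, int], digits_positions: Iterable[tuple[int, int]]
-- ) -> bool:
--     position_row, position_column = position
--     return any(
--         abs(row - position_row) <= 1 and abs(column - position_column) <= 1
--         for row, column in digits_positions
--     )
-- ===== SOURCE B (Python) =====
-- def _is_number_adjacent(position, digits_positions):
--     digits = set(digits_positions)
--     row, column = position
--     for dr in (-1, 0, 1):
--         for dc in (-1, 0, 1):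
--             if (row + dr, column + dc) in digits:
--                 return True
--     return False
-- ===== Notes on version B (the rewrite author's own statement) =====
-- stated objective: idiomatic
-- what changed: Instead of scanning every digit position and testing abs-distances, B builds a set of digit positions once and probes the 9 fixed neighbour coordinates (position + dr,dc offsets) for membership.
import Mathlib
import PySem

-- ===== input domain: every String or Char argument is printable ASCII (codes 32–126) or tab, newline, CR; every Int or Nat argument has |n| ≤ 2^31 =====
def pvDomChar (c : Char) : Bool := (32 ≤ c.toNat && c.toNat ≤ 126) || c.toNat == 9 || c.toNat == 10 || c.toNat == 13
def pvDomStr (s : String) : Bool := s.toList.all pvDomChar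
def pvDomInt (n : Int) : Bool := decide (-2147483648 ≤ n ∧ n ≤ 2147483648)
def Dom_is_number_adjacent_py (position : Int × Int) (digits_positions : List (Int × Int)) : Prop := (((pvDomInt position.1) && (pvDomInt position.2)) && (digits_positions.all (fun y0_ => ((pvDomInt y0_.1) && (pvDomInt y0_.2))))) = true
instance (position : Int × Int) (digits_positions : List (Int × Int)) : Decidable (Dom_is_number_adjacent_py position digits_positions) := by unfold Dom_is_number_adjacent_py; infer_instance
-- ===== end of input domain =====

-- B probes the 9 fixed neighbour cells against a set of the digit positions instead of
-- scanning every digit with abs-distance tests (idiomatic; same asymptotic cost).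

-- ===== PORT A =====
-- any(abs(row - position_row) <= 1 and abs(column - position_column) <= 1 for row, column in digits_positions)
def is_number_adjacent_py (position : Int × Int) (digits_positions : List (Int × Int)) : Bool :=
  digits_positions.any (fun rc =>
    decide (|rc.1 - position.1| ≤ 1) && decide (|rc.2 - position.2| ≤ 1))

-- ===== PORT B =====
-- build digits = set(digits_positions); probe the 9 neighbour coordinates
def is_number_adjacent_py_alt (position : Int × Int) (digits_positions : List (Int × Int)) : Bool :=
  let digits : PySem.Set (Int × Int) := PySem.Set.ofList digits_positions
  ([-1, 0, 1] : List Int).any (fun dr =>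
    ([-1, 0, 1] : List Int).any (fun dc =>
      PySem.Set.contains digits (position.1 + dr, position.2 + dc)))

-- ===== PRECONDITION & SPEC =====
def Spec_is_number_adjacent_py (position : Int × Int) (digits_positions : List (Int × Int)) (out : Bool) : Prop := out = is_number_adjacent_py_alt position digits_positions
instance (position : Int × Int) (digits_positions : List (Int × Int)) (out : Bool) : Decidable (Spec_is_number_adjacent_py position digits_positions out) := by unfold Spec_is_number_adjacent_py; infer_instance

-- ===== CLAIM (what is proved, stated in full; the proofs are below) =====
def Claim_equal_is_number_adjacent_py : Prop := ∀ (position : Int × Int) (digits_positions : List (Int × Int)), Dom_is_number_adjacent_py position digits_positions → Spec_is_number_adjacent_py position digits_positions (is_number_adjacent_py position digits_positions)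

-- ===== LEMMAS AND PROOFS =====

-- Both sides decide "some digit position is within Chebyshev distance 1 of position".
theorem isna_a_iff (position : Int × Int) (dps : List (Int × Int)) :
    is_number_adjacent_py position dps = true ↔
      ∃ rc ∈ dps, |rc.1 - position.1| ≤ 1 ∧ |rc.2 - position.2| ≤ 1 := by
  simp [is_number_adjacent_py]

theorem isna_b_iff (position : Int × Int) (dps : List (Int × Int)) :
    is_number_adjacent_py_alt position dps = true ↔
      ∃ rc ∈ dps, |rc.1 - position.1| ≤ 1 ∧ |rc.2 - position.2| ≤ 1 := by
  simp only [is_number_adjacent_py_alt, List.any_eq_true, PySem.Set.contains_iff, PySem.Set.mem_ofList]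
  constructor
  · rintro ⟨dr, hdr, dc, hdc, hmem⟩
    refine ⟨_, hmem, ?_, ?_⟩ <;>
    · simp only [List.mem_cons, List.not_mem_nil, or_false] at hdr hdc
      rcases hdr with h | h | h <;> rcases hdc with h' | h' | h' <;>
        simp [h, h']
  · rintro ⟨⟨r, c⟩, hmem, h1, h2⟩
    refine ⟨r - position.1, ?_, c - position.2, ?_, ?_⟩
    · rcases abs_le.mp h1 with ⟨hl, hr⟩; interval_cases h : (r - position.1) <;> simp
    · rcases abs_le.mp h2 with ⟨hl, hr⟩; interval_cases h : (c - position.2) <;> simp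
    · simpa using hmem

-- ===== VERDICT (by name: the statement is the Claim_ definition above) =====
theorem is_number_adjacent_py_spec : Claim_equal_is_number_adjacent_py := by
  intro position dps _
  unfold Spec_is_number_adjacent_py
  have := (isna_a_iff position dps).trans (isna_b_iff position dps).symm
  cases hA : is_number_adjacent_py position dps
  · cases hB : is_number_adjacent_py_alt position dps
    · rfl
    · exact absurd (this.mpr hB) (by simp [hA])
  · exact (this.mp hA).symm
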